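-- pv_equiv track=rewrite | github.com/clovesnascimento/cngsmkosmos | patch_proposer_prompt.py | find_injection_point
-- ===== SOURCE A (Python) =====
-- def find_injection_point(content: str, filename: str) -> int:
--     """
--     Encontra a linha onde injetar a regra.
--     Retorna o índice de linha (0-based) ou -1 se não encontrado.
--     """
--     lines = content.split('\n')
--
--     # Estratégia 1: injetar após as importações (primeiras linhas com import)
--     last_import_line = -1
--     for i, line in enumerate(lines):
--         stripped = line.strip()
--         if stripped.startswith('import ') or stripped.startswith('from '):
--             last_import_line = i
--         # Para de buscar após a primeira função/classe
--         if stripped.startswith('def ') or stripped.startswith('class '):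
--             break
--
--     if last_import_line >= 0:
--         return last_import_line + 1
--
--     # Fallback: linha 0
--     return 0
-- ===== SOURCE B (Python) =====
-- def find_injection_point(content: str, filename: str) -> int:
--     """Same result as A: first find the boundary (first def/class line),
--     then scan backwards in the prefix for the last import line."""
--     lines = content.split('\n')
--     boundary = len(lines)
--     for i, line in enumerate(lines):
--         s = line.strip()
--         if s.startswith('def ') or s.startswith('class '):
--             boundary = i
--             break
--     for i in range(boundary - 1, -1, -1):
--         s = lines[i].strip()
--         if s.startswith('import ') or s.startswith('from '):
--             return i + 1
--     return 0
-- ===== Notes on version B (the rewrite author's own statement) =====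
-- stated objective: alternative
-- what changed: A keeps a running last-import index in one forward scan with an early break; B first finds the def/class boundary, then scans backwards from it and returns at the first import line it meets.
import Mathlib
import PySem

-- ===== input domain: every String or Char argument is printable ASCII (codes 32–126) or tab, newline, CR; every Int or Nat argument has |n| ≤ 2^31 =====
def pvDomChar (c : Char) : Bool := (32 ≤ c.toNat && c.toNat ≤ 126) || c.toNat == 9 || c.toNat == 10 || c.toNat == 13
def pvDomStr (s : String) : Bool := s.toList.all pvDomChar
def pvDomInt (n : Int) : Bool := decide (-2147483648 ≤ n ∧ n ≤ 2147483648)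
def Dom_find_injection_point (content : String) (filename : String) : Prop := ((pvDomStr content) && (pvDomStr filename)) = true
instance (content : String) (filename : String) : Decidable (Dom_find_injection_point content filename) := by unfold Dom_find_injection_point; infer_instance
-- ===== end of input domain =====

-- B replaces A's forward scan with a running last-import index (and early break) by a
-- boundary search followed by a backwards scan of the prefix; same result, same cost.

-- ===== PORT A =====
-- stripped line starts with 'import ' or 'from '
def pvIsImp (s : String) : Bool :=
  PySem.Str.startswith s "import " || PySem.Str.startswith s "from "

-- stripped line starts with 'def ' or 'class '
def pvIsDef (s : String) : Bool :=
  PySem.Str.startswith s "def " || PySem.Str.startswith s "class "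

-- A's for-loop with early break: carries enumerate index i and last_import_line
def pvALoop : List String → Int → Int → Int
  | [], _, last => last
  | l :: ls, i, last =>
    let stripped := PySem.Str.strip l
    let last' := if pvIsImp stripped then i else last
    if pvIsDef stripped then last' else pvALoop ls (i + 1) last'

def find_injection_point (content : String) (filename : String) : Int :=
  let lines := (PySem.Str.split? content "\n").getD []   -- sep ≠ "": split? is some
  let last_import_line := pvALoop lines 0 (-1)
  if last_import_line ≥ 0 then last_import_line + 1 else 0

-- ===== PORT B =====
-- B's first loop: index of the first def/class line, else the list length
def pvBoundary : List String → Nat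
  | [] => 0
  | l :: ls => if pvIsDef (PySem.Str.strip l) then 0 else pvBoundary ls + 1

-- B's second loop: 'for i in range(boundary-1,-1,-1)' = scan of the reversed prefix
def pvBRev : List String → Int → Int
  | [], _ => 0
  | l :: ls, i => if pvIsImp (PySem.Str.strip l) then i + 1 else pvBRev ls (i - 1)

def find_injection_point_alt (content : String) (filename : String) : Int :=
  let lines := (PySem.Str.split? content "\n").getD []   -- sep ≠ "": split? is some
  let boundary := pvBoundary lines
  pvBRev (lines.take boundary).reverse ((boundary : Int) - 1)

-- ===== PRECONDITION & SPEC =====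
def Spec_find_injection_point (content : String) (filename : String) (out : Int) : Prop := out = find_injection_point_alt content filename
instance (content : String) (filename : String) (out : Int) : Decidable (Spec_find_injection_point content filename out) := by unfold Spec_find_injection_point; infer_instance

-- ===== CLAIM (what is proved, stated in full; the proofs are below) =====
def Claim_equal_find_injection_point : Prop := ∀ (content : String) (filename : String), Dom_find_injection_point content filename → Spec_find_injection_point content filename (find_injection_point content filename)

-- ===== LEMMAS AND PROOFS =====

-- index of the LAST import line in a list (specification middle-man)
def pvLastImp : List String → Option Nat
  | [] => none
  | l :: ls =>
    match pvLastImp ls with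
    | some j => some (j + 1)
    | none => if pvIsImp (PySem.Str.strip l) then some 0 else none

-- an import line is never also a def/class line (the prefixes are incompatible)
theorem pvImp_not_def (s : String) (hi : pvIsImp s = true) : pvIsDef s = false := by
  rw [Bool.eq_false_iff]
  intro hd
  unfold pvIsImp at hi
  unfold pvIsDef at hd
  simp only [Bool.or_eq_true, PySem.Str.startswith_eq, PySem.Chars.startswith_iff] at hi hd
  rcases hi with h1 | h1 <;> rcases hd with h2 | h2 <;>
    rcases List.prefix_or_prefix_of_prefix h1 h2 with h | h <;> revert h <;> decide

theorem pvLastImp_snoc (ls : List String) (l : String) :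
    pvLastImp (ls ++ [l]) =
      if pvIsImp (PySem.Str.strip l) then some ls.length else pvLastImp ls := by
  induction ls with
  | nil => simp [pvLastImp]
  | cons x xs ih =>
    simp only [List.cons_append, pvLastImp, ih, List.length_cons]
    by_cases h : pvIsImp (PySem.Str.strip l) = true
    · simp [h]
    · simp [h]

-- A's loop computes i + (last import index in the pre-boundary prefix), else last
theorem pvALoop_eq (ls : List String) (i last : Int) :
    pvALoop ls i last =
      match pvLastImp (ls.take (pvBoundary ls)) with
      | some j => i + j
      | none => last := by
  induction ls generalizing i last with
  | nil => simp [pvALoop, pvBoundary, pvLastImp]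
  | cons l ls ih =>
    by_cases hd : pvIsDef (PySem.Str.strip l) = true
    · have hi : pvIsImp (PySem.Str.strip l) = false := by
        cases h : pvIsImp (PySem.Str.strip l)
        · rfl
        · exact absurd (pvImp_not_def _ h) (by simp [hd])
      simp [pvALoop, pvBoundary, hd, hi, pvLastImp]
    · rw [Bool.not_eq_true] at hd
      simp only [pvALoop, pvBoundary, hd, Bool.false_eq_true, if_false, ih,
        List.take_succ_cons]
      cases hL : pvLastImp (ls.take (pvBoundary ls)) <;>
        by_cases hi : pvIsImp (PySem.Str.strip l) = true <;>
          simp [pvLastImp, hL, hi] <;> ring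

-- B's backward scan over the reversed prefix finds the last import index
theorem pvBRev_eq (pre : List String) :
    pvBRev pre.reverse ((pre.length : Int) - 1) =
      match pvLastImp pre with
      | some j => (j : Int) + 1
      | none => 0 := by
  induction pre using List.reverseRecOn with
  | nil => simp [pvBRev, pvLastImp]
  | append_singleton ls l ih =>
    rw [pvLastImp_snoc]
    simp only [List.reverse_append, List.reverse_singleton, List.singleton_append,
      List.length_append, List.length_singleton, pvBRev]
    by_cases hi : pvIsImp (PySem.Str.strip l) = true
    · simp [hi]
    · simp only [hi, Bool.false_eq_true, if_false]
      rw [show ((ls.length + 1 : Nat) : Int) - 1 - 1 = (ls.length : Int) - 1 by push_cast; ring]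
      exact ih

-- the boundary never exceeds the number of lines
theorem pvBoundary_le (ls : List String) : pvBoundary ls ≤ ls.length := by
  induction ls with
  | nil => simp [pvBoundary]
  | cons l ls ih =>
    simp only [pvBoundary, List.length_cons]
    split <;> omega

-- both ports, on any list of lines, reduce to the same function of pvLastImp
theorem pv_main (lines : List String) :
    (let last := pvALoop lines 0 (-1)
     if last ≥ 0 then last + 1 else 0) =
      pvBRev (lines.take (pvBoundary lines)).reverse
        (((lines.take (pvBoundary lines)).length : Int) - 1) := by
  rw [pvBRev_eq, pvALoop_eq]
  cases pvLastImp (lines.take (pvBoundary lines)) with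
  | none => simp
  | some j => simp

-- ===== VERDICT (by name: the statement is the Claim_ definition above) =====
theorem find_injection_point_spec : Claim_equal_find_injection_point := by
  intro content filename _
  unfold Spec_find_injection_point find_injection_point find_injection_point_alt
  have h := pv_main ((PySem.Str.split? content "\n").getD [])
  simp only at h
  rw [h]
  rw [List.length_take, Nat.min_eq_left (pvBoundary_le _)]
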